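-- pv_equiv track=rewrite | github.com/mit1221/Social-Networks | network_functions.py | common_networks
-- ===== SOURCE A (Python) =====
-- from typing import List, Tuple, Dict, TextIO
--
-- def common_networks(person: str, is_person_in_networks: bool, friend: str, \
--                     person_to_networks: Dict[str, List[str]], \
--                     network_to_people: Dict[str, List[str]]) -> int:
--     """Return the number of networks that person and friend have in common using
--     person_to_networks and network_to_people dictionaries.
--
--     >>> networks = {'Mit Kapadia': ['Chess Club', 'Finance Club'], \
--     'John Ventura': ['Chess Club', 'Law Association']}
--     >>> invert_networks = {'Chess Club': ['John Ventura', 'Mit Kapadia'], \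
--     'Finance Club': ['Mit Kapadia'], 'Law Association': ['John Ventura']}
--     >>> common_networks('Mit Kapadia', True, 'John Ventura', networks, \
-- invert_networks)
--     1
--     """
--     score = 0
--     if (is_person_in_networks) and (friend in person_to_networks):
--         for network in network_to_people:
--             if person in network_to_people[network] and friend in \
--                network_to_people[network]:
--                 score += 1
--     return score
-- ===== SOURCE B (Python) =====
-- def common_networks(person, is_person_in_networks, friend, person_to_networks, network_to_people):
--     """Count networks shared by person and friend: build the set of networks
--     containing each, then take the size of the intersection."""
--     if not (is_person_in_networks and friend in person_to_networks):
--         return 0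
--     nets_person = {net for net, people in network_to_people.items() if person in people}
--     nets_friend = {net for net, people in network_to_people.items() if friend in people}
--     return len(nets_person & nets_friend)
-- ===== Notes on version B (the rewrite author's own statement) =====
-- stated objective: alternative
-- what changed: Replaces A's single counting loop (membership test of both people per network) by a set formulation: build the set of networks containing person and the set containing friend, and return the size of their intersection.
import Mathlib
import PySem

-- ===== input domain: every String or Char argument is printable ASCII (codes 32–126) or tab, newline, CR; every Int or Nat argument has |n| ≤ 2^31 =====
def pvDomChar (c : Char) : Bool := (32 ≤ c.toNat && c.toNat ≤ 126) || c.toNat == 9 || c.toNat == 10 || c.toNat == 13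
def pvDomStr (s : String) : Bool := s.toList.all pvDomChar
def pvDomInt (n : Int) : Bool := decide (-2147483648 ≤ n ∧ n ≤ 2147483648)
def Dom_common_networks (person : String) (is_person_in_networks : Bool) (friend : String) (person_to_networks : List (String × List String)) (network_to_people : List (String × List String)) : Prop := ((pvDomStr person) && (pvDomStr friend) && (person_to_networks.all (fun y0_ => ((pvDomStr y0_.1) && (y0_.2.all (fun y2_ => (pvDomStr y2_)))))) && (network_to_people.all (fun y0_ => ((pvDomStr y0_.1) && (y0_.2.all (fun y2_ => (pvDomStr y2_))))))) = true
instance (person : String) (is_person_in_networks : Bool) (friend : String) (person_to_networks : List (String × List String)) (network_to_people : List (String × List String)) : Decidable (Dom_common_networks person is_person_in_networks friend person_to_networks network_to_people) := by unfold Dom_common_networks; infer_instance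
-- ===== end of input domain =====

-- B replaces A's single counting loop by a set formulation (networks containing person
-- ∩ networks containing friend), same cost; equivalence is proved on all inputs.

-- ===== PORT A =====
def common_networks (person : String) (is_person_in_networks : Bool) (friend : String) (person_to_networks : List (String × List String)) (network_to_people : List (String × List String)) : Int :=
  let score : Int := 0
  if is_person_in_networks && (PySem.Dict.ofList person_to_networks).contains friend then
    let d := PySem.Dict.ofList network_to_people
    d.keys.foldl (fun score network =>
      if (d.getD network []).contains person && (d.getD network []).contains friend
      then score + 1 else score) score
  else score

-- ===== PORT B =====
def common_networks_alt (person : String) (is_person_in_networks : Bool) (friend : String) (person_to_networks : List (String × List String)) (network_to_people : List (String × List String)) : Int :=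
  if !(is_person_in_networks && (PySem.Dict.ofList person_to_networks).contains friend) then 0
  else
    let items := (PySem.Dict.ofList network_to_people).items
    let netsPerson := PySem.Set.ofList ((items.filter (fun p => p.2.contains person)).map (·.1))
    let netsFriend := PySem.Set.ofList ((items.filter (fun p => p.2.contains friend)).map (·.1))
    ((PySem.Set.inter netsPerson netsFriend).length : Int)

-- ===== PRECONDITION & SPEC =====
def Spec_common_networks (person : String) (is_person_in_networks : Bool) (friend : String) (person_to_networks : List (String × List String)) (network_to_people : List (String × List String)) (out : Int) : Prop := out = common_networks_alt person is_person_in_networks friend person_to_networks network_to_people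
instance (person : String) (is_person_in_networks : Bool) (friend : String) (person_to_networks : List (String × List String)) (network_to_people : List (String × List String)) (out : Int) : Decidable (Spec_common_networks person is_person_in_networks friend person_to_networks network_to_people out) := by unfold Spec_common_networks; infer_instance

-- ===== CLAIM (what is proved, stated in full; the proofs are below) =====
def Claim_equal_common_networks : Prop := ∀ (person : String) (is_person_in_networks : Bool) (friend : String) (person_to_networks : List (String × List String)) (network_to_people : List (String × List String)), Dom_common_networks person is_person_in_networks friend person_to_networks network_to_people → Spec_common_networks person is_person_in_networks friend person_to_networks network_to_people (common_networks person is_person_in_networks friend person_to_networks network_to_people)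

-- ===== LEMMAS AND PROOFS =====

-- The filtered-key list behind one of B's set comprehensions: over the items of a
-- nodup-key dict, filtering on the value and projecting to keys is filtering the keys.
theorem filter_items_map_fst {q : List String → Bool} (d : PySem.Dict String (List String))
    (hnd : d.keys.Nodup) :
    ((d.items.filter (fun p => q p.2)).map (·.1))
      = d.keys.filter (fun k => q (d.getD k [])) := by
  rw [PySem.Dict.items_eq_map_keys d hnd []]
  rw [List.filter_map, List.map_map]
  simp [Function.comp_def]

-- ===== VERDICT (by name: the statement is the Claim_ definition above) =====
theorem common_networks_spec : Claim_equal_common_networks := by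
  intro person b friend pn np _
  unfold Spec_common_networks common_networks common_networks_alt
  cases hg : (b && (PySem.Dict.ofList pn).contains friend) with
  | false => simp
  | true =>
    simp only [if_true, Bool.not_true, Bool.false_eq_true, if_false]
    set d := PySem.Dict.ofList np with hd
    have hnd : d.keys.Nodup := PySem.Dict.nodup_keys_ofList np
    rw [filter_items_map_fst d hnd, filter_items_map_fst d hnd]
    set P : String → Bool := fun k => (d.getD k []).contains person with hP
    set Q : String → Bool := fun k => (d.getD k []).contains friend with hQ
    rw [PySem.Set.ofList_eq_self_of_nodup _ (hnd.filter P),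
        PySem.Set.ofList_eq_self_of_nodup _ (hnd.filter Q)]
    have hinter : PySem.Set.inter (d.keys.filter P) (d.keys.filter Q)
        = (d.keys.filter P).filter (fun k => (d.keys.filter Q).contains k) := by
      simp [PySem.Set.inter]
    rw [hinter]
    have hcongr : (d.keys.filter P).filter (fun k => (d.keys.filter Q).contains k)
        = (d.keys.filter P).filter Q := by
      apply List.filter_congr
      intro k hk
      have hkmem : k ∈ d.keys := List.mem_of_mem_filter hk
      simp [List.mem_filter, hkmem]
    rw [hcongr, List.filter_filter]
    rw [PySem.List.foldl_if_add_one, ← List.countP_eq_length_filter]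
    rw [List.countP_congr (q := fun k => Q k && P k) (fun k _ => by
      simp [hP, hQ, Bool.and_comm])]
    simp
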